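-- pv_equiv track=rewrite | github.com/JaviGomez02/Programacion | Arrives/worksheet4.py | ejercicio7
-- ===== SOURCE A (Python) =====
-- def ejercicio7(cadena, palabraBuscar, palabraNueva):
--     array=[]
--     cadenaAux=""
--     for i in range (len(cadena)):
--         if cadena[i]!=" ":
--             cadenaAux+=cadena[i]
--         else:
--             array.append(cadenaAux)
--             cadenaAux=""
--     array.append(cadenaAux)
--
--     for i in range(len(array)):
--         if array[i]==palabraBuscar:
--             array[i]=palabraNueva
--     return array
-- ===== SOURCE B (Python) =====
-- def ejercicio7(cadena, palabraBuscar, palabraNueva):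
--     return [palabraNueva if w == palabraBuscar else w for w in cadena.split(" ")]
-- ===== Notes on version B (the rewrite author's own statement) =====
-- stated objective: simpler
-- what changed: Replaces the hand-written character-by-character tokenizer (accumulator loop) plus an in-place index replacement loop with a single str.split(" ") call and a list comprehension; the C-implemented split gives a constant-factor speedup.
import Mathlib
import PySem

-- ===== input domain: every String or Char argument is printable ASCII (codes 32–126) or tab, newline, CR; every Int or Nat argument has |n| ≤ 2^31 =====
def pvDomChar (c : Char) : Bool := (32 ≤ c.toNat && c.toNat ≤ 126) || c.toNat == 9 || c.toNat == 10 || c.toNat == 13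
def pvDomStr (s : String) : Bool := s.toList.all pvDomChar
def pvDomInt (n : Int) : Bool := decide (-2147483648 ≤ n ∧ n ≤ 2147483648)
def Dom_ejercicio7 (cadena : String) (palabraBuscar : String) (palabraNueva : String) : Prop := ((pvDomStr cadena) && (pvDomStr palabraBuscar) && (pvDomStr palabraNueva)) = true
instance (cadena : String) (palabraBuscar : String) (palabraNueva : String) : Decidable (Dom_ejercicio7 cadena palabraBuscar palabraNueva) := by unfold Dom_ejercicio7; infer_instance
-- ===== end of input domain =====

-- B replaces A's character-by-character tokenizer and index replacement loop with
-- a single split(" ") plus a comprehension; same return value on all inputs (objective: simpler).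


-- ===== PORT A =====
-- first loop: for each character, accumulate into cadenaAux or flush it into array
def ej7_step (st : List String × String) (c : Char) : List String × String :=
  if c ≠ ' ' then (st.1, st.2.push c) else (st.1 ++ [st.2], "")

-- second loop: for i in range(len(array)): if array[i]==palabraBuscar: array[i]=palabraNueva
def ej7_replace (arr : List String) (palabraBuscar palabraNueva : String) : List String :=
  match arr with
  | [] => []
  | w :: ws => (if w == palabraBuscar then palabraNueva else w) :: ej7_replace ws palabraBuscar palabraNueva

def ejercicio7 (cadena : String) (palabraBuscar : String) (palabraNueva : String) : List String :=
  let st := cadena.toList.foldl ej7_step ([], "")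
  ej7_replace (st.1 ++ [st.2]) palabraBuscar palabraNueva

-- ===== PORT B =====
def ejercicio7_alt (cadena : String) (palabraBuscar : String) (palabraNueva : String) : List String :=
  ((PySem.Str.split? cadena " ").getD []).map
    (fun w => if w == palabraBuscar then palabraNueva else w)

-- ===== PRECONDITION & SPEC =====
def Spec_ejercicio7 (cadena : String) (palabraBuscar : String) (palabraNueva : String) (out : List String) : Prop := out = ejercicio7_alt cadena palabraBuscar palabraNueva
instance (cadena : String) (palabraBuscar : String) (palabraNueva : String) (out : List String) : Decidable (Spec_ejercicio7 cadena palabraBuscar palabraNueva out) := by unfold Spec_ejercicio7; infer_instance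

-- ===== CLAIM (what is proved, stated in full; the proofs are below) =====
def Claim_equal_ejercicio7 : Prop := ∀ (cadena : String) (palabraBuscar : String) (palabraNueva : String), Dom_ejercicio7 cadena palabraBuscar palabraNueva → Spec_ejercicio7 cadena palabraBuscar palabraNueva (ejercicio7 cadena palabraBuscar palabraNueva)

-- ===== LEMMAS AND PROOFS =====

-- char-level version of A's first loop
def ej7_cstep (st : List (List Char) × List Char) (c : Char) : List (List Char) × List Char :=
  if c ≠ ' ' then (st.1, st.2 ++ [c]) else (st.1 ++ [st.2], [])

theorem ej7_foldl_str_char (cs : List Char) :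
    ∀ (A : List (List Char)) (x : List Char),
    cs.foldl ej7_step (A.map String.ofList, String.ofList x)
      = ((cs.foldl ej7_cstep (A, x)).1.map String.ofList,
         String.ofList (cs.foldl ej7_cstep (A, x)).2) := by
  induction cs with
  | nil => intro A x; simp
  | cons c cs ih =>
    intro A x
    simp only [List.foldl_cons, ej7_step, ej7_cstep]
    by_cases hc : c = ' '
    · subst hc; simp only [ne_eq, not_true_eq_false, if_false]
      have : (A.map String.ofList ++ [String.ofList x], ("" : String))
          = ((A ++ [x]).map String.ofList, String.ofList []) := by simp
      rw [this, ih]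
    · simp only [ne_eq, hc, not_false_eq_true, if_true]
      have : (A.map String.ofList, (String.ofList x).push c)
          = (A.map String.ofList, String.ofList (x ++ [c])) := by
        rw [Prod.mk.injEq]
        exact ⟨rfl, String.toList_inj.mp (by simp)⟩
      rw [this, ih]

-- prefix accumulation for the char-level fold
theorem ej7_cfold_acc (cs : List Char) :
    ∀ (A : List (List Char)) (x : List Char),
    cs.foldl ej7_cstep (A, x)
      = (A ++ (cs.foldl ej7_cstep ([], x)).1, (cs.foldl ej7_cstep ([], x)).2) := by
  induction cs with
  | nil => intro A x; simp
  | cons c cs ih =>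
    intro A x
    simp only [List.foldl_cons, ej7_cstep]
    by_cases hc : c = ' '
    · subst hc
      simp only [ne_eq, not_true_eq_false, if_false, List.nil_append]
      rw [ih (A ++ [x]) [], ih [x] []]
      simp
    · simp only [ne_eq, hc, not_false_eq_true, if_true]
      exact ih A (x ++ [c])

-- Chars.splitOn with a single-space separator equals the char-level fold
theorem ej7_go_eq (fuel : Nat) : ∀ (l cur : List Char) (acc : List (List Char)),
    l.length < fuel →
    PySem.Chars.splitOn.go [' '] fuel l cur acc
      = acc.reverse ++ ((l.foldl ej7_cstep ([], cur.reverse)).1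
          ++ [(l.foldl ej7_cstep ([], cur.reverse)).2]) := by
  induction fuel with
  | zero => intro l cur acc h; omega
  | succ fuel ih =>
    intro l cur acc h
    match l with
    | [] => simp [PySem.Chars.splitOn.go]
    | c :: rest =>
      rw [PySem.Chars.splitOn.go]
      by_cases hc : c = ' '
      · subst hc
        have hpre : [' '].isPrefixOf (' ' :: rest) = true := by
          simp [List.isPrefixOf]
        rw [if_pos hpre]
        simp only [List.length_cons] at h
        rw [ih _ _ _ (by simpa using Nat.lt_of_succ_lt_succ h)]
        simp only [List.foldl_cons, ej7_cstep, ne_eq, not_true_eq_false, if_false,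
          List.nil_append, List.reverse_cons, List.reverse_nil]
        rw [ej7_cfold_acc rest [cur.reverse] []]
        simp
      · have hpre : [' '].isPrefixOf (c :: rest) = false := by
          simp only [List.isPrefixOf, Bool.and_eq_false_iff, beq_eq_false_iff_ne, ne_eq]
          exact Or.inl fun h => hc h.symm
        rw [if_neg (by simp [hpre])]
        simp only [List.length_cons] at h
        rw [ih _ _ _ (Nat.lt_of_succ_lt_succ h)]
        simp only [List.foldl_cons, ej7_cstep, ne_eq, hc, not_false_eq_true, if_true]
        simp

theorem ej7_splitOn_eq (cs : List Char) :
    PySem.Chars.splitOn cs [' ']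
      = (cs.foldl ej7_cstep ([], [])).1 ++ [(cs.foldl ej7_cstep ([], [])).2] := by
  have := ej7_go_eq (cs.length + 1) cs [] [] (by omega)
  simpa [PySem.Chars.splitOn] using this

theorem ej7_replace_eq_map (arr : List String) (pB pN : String) :
    ej7_replace arr pB pN = arr.map (fun w => if w == pB then pN else w) := by
  induction arr with
  | nil => rfl
  | cons w ws ih => simp [ej7_replace, ih]

-- ===== VERDICT (by name: the statement is the Claim_ definition above) =====
theorem ejercicio7_spec : Claim_equal_ejercicio7 := by
  intro cadena pB pN _
  show ejercicio7 cadena pB pN = ejercicio7_alt cadena pB pN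
  unfold ejercicio7 ejercicio7_alt
  have hsplit : PySem.Str.split? cadena " "
      = some ((PySem.Chars.splitOn cadena.toList [' ']).map String.ofList) := by
    simp [PySem.Str.split?, PySem.Chars.split?]
  rw [hsplit]
  simp only [Option.getD_some]
  have h1 : cadena.toList.foldl ej7_step (([] : List (List Char)).map String.ofList, String.ofList [])
      = ((cadena.toList.foldl ej7_cstep ([], [])).1.map String.ofList,
         String.ofList (cadena.toList.foldl ej7_cstep ([], [])).2) :=
    ej7_foldl_str_char cadena.toList [] []
  simp only [List.map_nil] at h1
  have h0 : (String.ofList [] : String) = "" := rfl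
  rw [h0] at h1
  rw [ej7_replace_eq_map, h1, ej7_splitOn_eq]
  simp
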